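-- pv_equiv track=rewrite | github.com/InfinityBowman/slu-faculty-explorer | pipeline/field_benchmark.py | histogram_landmarks
-- ===== SOURCE A (Python) =====
-- def histogram_landmarks(histogram):
--     """From {h: count} compute p25/p50/p75/p90/p95/p99 and total sample size."""
--     if not histogram:
--         return None
--     total = sum(histogram.values())
--     cum = 0
--     landmarks = {}
--     targets = {"p25": 0.25, "p50": 0.50, "p75": 0.75, "p90": 0.90, "p95": 0.95, "p99": 0.99}
--     sorted_hs = sorted(histogram.items())
--     for target_name, target_frac in targets.items():
--         target_count = target_frac * total
--         running = 0
--         for h, c in sorted_hs: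
--             running += c
--             if running >= target_count:
--                 landmarks[target_name] = h
--                 break
--         else:
--             landmarks[target_name] = sorted_hs[-1][0]
--     landmarks["n"] = total
--     return landmarks
-- ===== SOURCE B (Python) =====
-- def histogram_landmarks(histogram):
--     """Single sweep: one pass over the sorted histogram resolves all six percentile targets at once."""
--     if not histogram:
--         return None
--     items = sorted(histogram.items())
--     total = sum(c for _, c in items)
--     targets = [("p25", 0.25), ("p50", 0.50), ("p75", 0.75),
--                ("p90", 0.90), ("p95", 0.95), ("p99", 0.99)]
--     pending = [(name, frac * total) for name, frac in targets]
--     assigned = {}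
--     running = 0
--     for h, c in items:
--         running += c
--         hit = [p for p in pending if running >= p[1]]
--         pending = [p for p in pending if not running >= p[1]]
--         for name, _ in hit:
--             assigned[name] = h
--     last = items[-1][0]
--     result = {name: assigned.get(name, last) for name, _ in targets}
--     result["n"] = total
--     return result
-- ===== Notes on version B (the rewrite author's own statement) =====
-- stated objective: alternative
-- what changed: A rescans the sorted histogram from scratch for each of the six percentile targets; B makes one sweep over the sorted histogram, maintaining a running count and a pending-target set, assigning each target the first key whose running count reaches its threshold.
import Mathlib
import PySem

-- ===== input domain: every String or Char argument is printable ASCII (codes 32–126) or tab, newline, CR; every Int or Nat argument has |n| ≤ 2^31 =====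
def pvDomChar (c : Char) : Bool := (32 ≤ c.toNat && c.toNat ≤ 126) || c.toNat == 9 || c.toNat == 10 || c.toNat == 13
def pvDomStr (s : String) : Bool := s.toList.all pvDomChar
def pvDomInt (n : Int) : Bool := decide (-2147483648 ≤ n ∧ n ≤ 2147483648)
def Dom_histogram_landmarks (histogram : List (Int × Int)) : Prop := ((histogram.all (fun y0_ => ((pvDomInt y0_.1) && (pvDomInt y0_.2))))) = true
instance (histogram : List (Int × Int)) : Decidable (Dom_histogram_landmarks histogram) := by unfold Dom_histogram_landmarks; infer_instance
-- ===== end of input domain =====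

-- B replaces A's six separate scans of the sorted histogram by ONE sweep that resolves all
-- pending percentile targets as the running count crosses their thresholds (objective: alternative).

-- ===== shared float semantics (used by both ports: both Pythons compute `frac * total`) =====
-- Exact IEEE-754 double model for `frac * total` (round-to-nearest-even to 53 significand
-- bits, no exponent clamping): exact for every |total| below the double overflow threshold;
-- Python's int→float OverflowError (|total| ≥ ~2^1024, needing a list of length ≥ 2^992
-- under Dom's |count| ≤ 2^31) is not modelled.
def pvRound53 (m : Int) (e : Int) : Int × Int :=
  if m = 0 then (0, 0) else
    let n := m.natAbs
    let bits := Nat.log2 n + 1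
    if bits ≤ 53 then (m, e) else
      let s := bits - 53
      let q := n >>> s
      let r := n - (q <<< s)
      let half := 1 <<< (s - 1)
      let q' := if r > half ∨ (r = half ∧ q % 2 = 1) then q + 1 else q
      ((if m < 0 then -(q' : Int) else (q' : Int)), e + (s : Int))

-- the double `frac * total` (frac given as the exact dyadic value fm·2^fe of the literal)
def pvFracMulTotal (fm : Int) (fe : Int) (total : Int) : Int × Int :=
  let t := pvRound53 total 0
  pvRound53 (fm * t.1) (fe + t.2)

-- Python's exact `running >= t` for int running and double t = t.1·2^t.2
def pvGeThresh (running : Int) (t : Int × Int) : Bool :=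
  if t.2 ≥ 0 then decide (running ≥ t.1 * 2 ^ t.2.toNat)
  else decide (running * 2 ^ (-t.2).toNat ≥ t.1)

-- the six targets; the pair is the exact dyadic value of the Python float literal
def pvTargets : List (String × Int × Int) :=
  [("p25", (1, -2)), ("p50", (1, -1)), ("p75", (3, -2)),
   ("p90", (8106479329266893, -53)), ("p95", (4278419646001971, -52)),
   ("p99", (4458563631096791, -52))]

-- ===== PORT A =====
-- A's inner `for h, c in sorted_hs: running += c; if running >= target_count: … break` with its else
def pvScanA : List (Int × Int) → Int → Int × Int → Option Int
  | [], _, _ => none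
  | (h, c) :: rest, running, t =>
      let running' := running + c
      if pvGeThresh running' t then some h else pvScanA rest running' t

def histogram_landmarks (histogram : List (Int × Int)) : Option (List (String × Int)) :=
  let d := PySem.Dict.ofList histogram
  if d.items = [] then none else
    let total := d.values.sum
    let sorted_hs := PySem.List.sorted2 d.items (·.1) (·.2)
    let landmarks := pvTargets.foldl (fun lm p =>
        let t := pvFracMulTotal p.2.1 p.2.2 total
        match pvScanA sorted_hs 0 t with
        | some h => lm ++ [(p.1, h)]
        -- for-else: sorted_hs[-1][0]; sorted_hs is nonempty here, the default is unreachable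
        | none => lm ++ [(p.1, ((PySem.List.pyGet? sorted_hs (-1)).getD (0, 0)).1)]) []
    some (landmarks ++ [("n", total)])

-- ===== PORT B =====
-- B's single sweep: state = (still-pending targets, landmarks assigned so far)
def pvLoopB : List (Int × Int) → Int → List (String × Int × Int) → PySem.Dict String Int →
    List (String × Int × Int) × PySem.Dict String Int
  | [], _, pending, assigned => (pending, assigned)
  | (h, c) :: rest, running, pending, assigned =>
      let running' := running + c
      let hit := pending.filter (fun p => pvGeThresh running' p.2)
      let pending' := pending.filter (fun p => !pvGeThresh running' p.2)
      pvLoopB rest running' pending' (hit.foldl (fun a p => a.insert p.1 h) assigned)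

def histogram_landmarks_alt (histogram : List (Int × Int)) : Option (List (String × Int)) :=
  let d := PySem.Dict.ofList histogram
  if d.items = [] then none else
    let items := PySem.List.sorted2 d.items (·.1) (·.2)
    let total := (items.map (·.2)).sum
    let pending := pvTargets.map (fun p => (p.1, pvFracMulTotal p.2.1 p.2.2 total))
    let assigned := (pvLoopB items 0 pending PySem.Dict.empty).2
    -- items[-1][0]; items is nonempty here, the default is unreachable
    let last := ((PySem.List.pyGet? items (-1)).getD (0, 0)).1
    some ((pvTargets.map (fun p => (p.1, assigned.getD p.1 last))) ++ [("n", total)])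

-- ===== PRECONDITION & SPEC =====
def Spec_histogram_landmarks (histogram : List (Int × Int)) (out : Option (List (String × Int))) : Prop := out = histogram_landmarks_alt histogram
instance (histogram : List (Int × Int)) (out : Option (List (String × Int))) : Decidable (Spec_histogram_landmarks histogram out) := by unfold Spec_histogram_landmarks; infer_instance

-- ===== CLAIM (what is proved, stated in full; the proofs are below) =====
def Claim_equal_histogram_landmarks : Prop := ∀ (histogram : List (Int × Int)), Dom_histogram_landmarks histogram → Spec_histogram_landmarks histogram (histogram_landmarks histogram)

-- ===== LEMMAS AND PROOFS =====

-- inserting only keys ≠ name leaves the lookup of name unchanged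
theorem pvFoldlInsert_get?_of_not_mem (l : List (String × Int × Int)) (h : Int)
    (a : PySem.Dict String Int) (name : String) (hn : name ∉ l.map Prod.fst) :
    (l.foldl (fun a p => a.insert p.1 h) a).get? name = a.get? name := by
  induction l generalizing a with
  | nil => rfl
  | cons p l ih =>
      simp only [List.map_cons, List.mem_cons, not_or] at hn
      rw [List.foldl_cons, ih _ hn.2, PySem.Dict.get?_insert_of_ne _ _ hn.1]

-- if (name, t) occurs in l with nodup keys, the fold assigns name ↦ h
theorem pvFoldlInsert_get?_of_mem (l : List (String × Int × Int)) (h : Int)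
    (a : PySem.Dict String Int) (name : String) (t : Int × Int)
    (hmem : (name, t) ∈ l) (hnd : (l.map Prod.fst).Nodup) :
    (l.foldl (fun a p => a.insert p.1 h) a).get? name = some h := by
  induction l generalizing a with
  | nil => cases hmem
  | cons p l ih =>
      simp only [List.map_cons, List.nodup_cons] at hnd
      rcases List.mem_cons.1 hmem with h1 | h1
      · subst h1
        rw [List.foldl_cons, pvFoldlInsert_get?_of_not_mem _ _ _ _ hnd.1,
          PySem.Dict.get?_insert_self]
      · rw [List.foldl_cons]; exact ih _ h1 hnd.2

-- the sweep never touches keys outside pending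
theorem pvLoopB_get?_of_not_mem (items : List (Int × Int)) (r : Int)
    (pending : List (String × Int × Int)) (a : PySem.Dict String Int) (name : String)
    (hn : name ∉ pending.map Prod.fst) :
    (pvLoopB items r pending a).2.get? name = a.get? name := by
  induction items generalizing r pending a with
  | nil => rfl
  | cons pc rest ih =>
      obtain ⟨h, c⟩ := pc
      rw [pvLoopB]
      rw [ih]
      · exact pvFoldlInsert_get?_of_not_mem _ _ _ _
          (fun hc => hn (List.Sublist.subset (List.Sublist.map _ List.filter_sublist) hc))
      · exact fun hc => hn (List.Sublist.subset (List.Sublist.map _ List.filter_sublist) hc)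

-- key lemma: the sweep's final value for a pending target is exactly A's scan result
theorem pvLoopB_get?_of_mem (items : List (Int × Int)) (r : Int)
    (pending : List (String × Int × Int)) (a : PySem.Dict String Int)
    (name : String) (t : Int × Int)
    (hmem : (name, t) ∈ pending) (hnd : (pending.map Prod.fst).Nodup)
    (ha : a.get? name = none) :
    (pvLoopB items r pending a).2.get? name = pvScanA items r t := by
  induction items generalizing r pending a with
  | nil => simpa [pvLoopB, pvScanA] using ha
  | cons pc rest ih =>
      obtain ⟨h, c⟩ := pc
      rw [pvLoopB, pvScanA]
      by_cases hge : pvGeThresh (r + c) t = true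
      · simp only [hge, if_pos]
        have hhit : (name, t) ∈ pending.filter (fun p => pvGeThresh (r + c) p.2) :=
          List.mem_filter.2 ⟨hmem, hge⟩
        have hnk : name ∉ (pending.filter (fun p => !pvGeThresh (r + c) p.2)).map Prod.fst := by
          intro hk
          rcases List.mem_map.1 hk with ⟨q, hq, hq1⟩
          have hq' := List.mem_filter.1 hq
          have : q = (name, t) := by
            have := List.inj_on_of_nodup_map hnd hq'.1 hmem (by simp [hq1])
            simpa [this] using hq1 ▸ rfl
          rw [this] at hq'
          simp [hge] at hq'
        rw [pvLoopB_get?_of_not_mem _ _ _ _ _ hnk]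
        exact pvFoldlInsert_get?_of_mem _ _ _ _ t hhit
          (hnd.sublist (List.Sublist.map _ List.filter_sublist))
      · have hgf : pvGeThresh (r + c) t = false := by simpa using hge
        rw [if_neg hge]
        apply ih
        · exact List.mem_filter.2 ⟨hmem, by simp [hgf]⟩
        · exact hnd.sublist (List.Sublist.map _ List.filter_sublist)
        · rw [pvFoldlInsert_get?_of_not_mem _ _ _ _ ?_]
          · exact ha
          · intro hk
            rcases List.mem_map.1 hk with ⟨q, hq, hq1⟩
            have hq' := List.mem_filter.1 hq
            have : q = (name, t) := by
              have := List.inj_on_of_nodup_map hnd hq'.1 hmem (by simp [hq1])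
              simpa [this] using hq1 ▸ rfl
            rw [this] at hq'
            simp [hgf] at hq'


-- the final getD of a pending target equals A's scan, stated once for the six instantiations
theorem pvLoopB_getD (items : List (Int × Int))
    (pending : List (String × Int × Int)) (name : String) (t : Int × Int) (last : Int)
    (hmem : (name, t) ∈ pending) (hnd : (pending.map Prod.fst).Nodup) :
    (pvLoopB items 0 pending PySem.Dict.empty).2.getD name last
      = (pvScanA items 0 t).getD last := by
  rw [PySem.Dict.getD_eq_get?_getD,
    pvLoopB_get?_of_mem items 0 pending PySem.Dict.empty name t hmem hnd (by rfl)]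

-- ===== VERDICT (by name: the statement is the Claim_ definition above) =====
theorem histogram_landmarks_spec : Claim_equal_histogram_landmarks := by
  intro histogram _
  show histogram_landmarks histogram = histogram_landmarks_alt histogram
  simp only [histogram_landmarks, histogram_landmarks_alt]
  by_cases hne : (PySem.Dict.ofList histogram).items = []
  · simp [hne]
  · rw [if_neg hne, if_neg hne]
    have hperm : (PySem.List.sorted2 (PySem.Dict.ofList histogram).items (·.1) (·.2)).Perm
        (PySem.Dict.ofList histogram).items :=
      PySem.List.sorted2_perm _ _ _ _
    have htot : ((PySem.List.sorted2 (PySem.Dict.ofList histogram).items (·.1) (·.2)).map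
        (·.2)).sum = (PySem.Dict.ofList histogram).values.sum := by
      simp only [PySem.Dict.values]
      exact (hperm.map (·.2)).sum_eq
    rw [htot]
    generalize (PySem.Dict.ofList histogram).values.sum = T
    generalize PySem.List.sorted2 (PySem.Dict.ofList histogram).items (·.1) (·.2) = its
    generalize ((PySem.List.pyGet? its (-1)).getD (0, 0)).1 = last
    simp only [pvTargets, List.foldl_cons, List.foldl_nil, List.map_cons, List.map_nil]
    have hnd : (([("p25", pvFracMulTotal 1 (-2) T), ("p50", pvFracMulTotal 1 (-1) T),
        ("p75", pvFracMulTotal 3 (-2) T), ("p90", pvFracMulTotal 8106479329266893 (-53) T),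
        ("p95", pvFracMulTotal 4278419646001971 (-52) T),
        ("p99", pvFracMulTotal 4458563631096791 (-52) T)]).map Prod.fst).Nodup := by
      simp only [List.map_cons, List.map_nil]; decide
    rw [pvLoopB_getD its _ "p25" (pvFracMulTotal 1 (-2) T) last (by simp) hnd,
      pvLoopB_getD its _ "p50" (pvFracMulTotal 1 (-1) T) last (by simp) hnd,
      pvLoopB_getD its _ "p75" (pvFracMulTotal 3 (-2) T) last (by simp) hnd,
      pvLoopB_getD its _ "p90" (pvFracMulTotal 8106479329266893 (-53) T) last (by simp) hnd,
      pvLoopB_getD its _ "p95" (pvFracMulTotal 4278419646001971 (-52) T) last (by simp) hnd,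
      pvLoopB_getD its _ "p99" (pvFracMulTotal 4458563631096791 (-52) T) last (by simp) hnd]
    rcases pvScanA its 0 (pvFracMulTotal 1 (-2) T) with _ | v1 <;>
      rcases pvScanA its 0 (pvFracMulTotal 1 (-1) T) with _ | v2 <;>
      rcases pvScanA its 0 (pvFracMulTotal 3 (-2) T) with _ | v3 <;>
      rcases pvScanA its 0 (pvFracMulTotal 8106479329266893 (-53) T) with _ | v4 <;>
      rcases pvScanA its 0 (pvFracMulTotal 4278419646001971 (-52) T) with _ | v5 <;>
      rcases pvScanA its 0 (pvFracMulTotal 4458563631096791 (-52) T) with _ | v6 <;>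
      rfl
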